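-- pv_equiv track=rewrite | github.com/mayur0906/StegPy | encode.py | encode_input
-- ===== SOURCE A (Python) =====
-- def encode_map_string(input_string):
--     # get the length of the input string
--     length = len(input_string)
--     binary = ""
--     # looping through the length of string
--     for i in range(0, length):
--         # ord is to get the ASCII value of input string negate it the value of a and add 1 to it
--         # format is to get the output in 6 bit format for your block
--         binary += format((ord(input_string[i]) - ord('a') + 1), '06b')
--     return binary
--
-- def encode_map_numbers(input_numbers):
--     # get the length of input numbers
--     length = len(input_numbers)
--     binary = ""
--     for i in range(0, length):
--         binary += format((ord(input_numbers[i]) - ord('0') + 27), '06b')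
--     return binary
--
-- def encode_map_period(input_period):
--     # get the length of input numbers
--     binary = ""
--     binary += format((ord(input_period) - ord('.') + 37), '06b')
--     return binary
--
-- def encode_map_space(input_space):
--     # get the length of input numbers
--     binary = ""
--     binary += format((ord(input_space) - ord(' ') + 38), '06b')
--     return binary
--
-- def encode_map_hiphen(input_space):
--     # get the length of input numbers
--     binary = ""
--     binary += format((ord(input_space) - ord('-') + 39), '06b')
--     return binary
--
-- def encode_map_single_quote(input_space):
--     # get the length of input numbers
--     binary = ""
--     binary += format((ord(input_space) - ord('\'') + 40), '06b')
--     return binary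
--
-- def encode_map_double_quote(input_space):
--     # get the length of input numbers
--     binary = ""
--     binary += format((ord(input_space) - ord('"') + 41), '06b')
--     return binary
--
-- def encode_map_tilde(input_space):
--     # get the length of input numbers
--     binary = ""
--     binary += format((ord(input_space) - ord('~') + 50), '06b')
--     return binary
--
-- def encode_input(input):
--     input_lower = input.lower()
--     length = len(input)
--     binary = ""
--     for i in range(0,length):
--         if(input_lower[i].isalpha()):
--             binary = binary + encode_map_string(input_lower[i])
--         elif(input_lower[i].isdigit()):
--             binary = binary + encode_map_numbers(input_lower[i])
--         elif(input_lower[i].isspace()):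
--             binary = binary + encode_map_space(input_lower[i])
--         elif(input_lower[i] == "."):
--             binary = binary + encode_map_period(input_lower[i])
--         elif (input_lower[i] == "-"):
--             binary = binary + encode_map_hiphen(input_lower[i])
--         elif (input_lower[i] == "'"):
--             binary = binary + encode_map_single_quote(input_lower[i])
--         elif (input_lower[i] == "\""):
--             binary = binary + encode_map_double_quote(input_lower[i])
--         elif (input_lower[i] == "~"):
--             binary = binary + encode_map_tilde(input_lower[i])
--     return binary
-- ===== SOURCE B (Python) =====
-- # Translation-table rewrite: all classification happens once, at table-build time;
-- # encoding itself is a single lookup per character with no conditionals.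
-- def _build_table():
--     t = {}
--     for c in "abcdefghijklmnopqrstuvwxyz":
--         t[c] = format(ord(c) - ord('a') + 1, '06b')
--     for c in "0123456789":
--         t[c] = format(ord(c) - ord('0') + 27, '06b')
--     for c in " \t\n\x0b\x0c\r":
--         t[c] = format(ord(c) - ord(' ') + 38, '06b')
--     for c, code in (('.', 37), ('-', 39), ("'", 40), ('"', 41), ('~', 50)):
--         t[c] = format(code, '06b')
--     return t
--
-- _TABLE = _build_table()
--
-- def encode_input(input):
--     return ''.join(_TABLE.get(c, '') for c in input.lower())
-- ===== Notes on version B (the rewrite author's own statement) =====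
-- stated objective: alternative
-- what changed: The per-character if/elif classification cascade (with its eight helper encoders) is replaced by a char-to-code translation table precomputed once from the character classes, so encoding is a single unconditional dict lookup per character joined at the end.
import Mathlib
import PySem

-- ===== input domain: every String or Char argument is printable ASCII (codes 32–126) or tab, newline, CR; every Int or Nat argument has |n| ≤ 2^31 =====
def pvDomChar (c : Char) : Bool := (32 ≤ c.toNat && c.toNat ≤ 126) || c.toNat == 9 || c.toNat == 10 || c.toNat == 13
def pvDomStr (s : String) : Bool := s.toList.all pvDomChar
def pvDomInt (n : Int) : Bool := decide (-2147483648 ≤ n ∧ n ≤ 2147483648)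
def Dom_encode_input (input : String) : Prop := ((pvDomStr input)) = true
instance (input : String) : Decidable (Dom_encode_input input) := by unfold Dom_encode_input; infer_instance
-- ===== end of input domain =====

-- B replaces A's per-character if/elif cascade by a translation table precomputed once
-- from the character classes; encoding is then one dict lookup per character (objective:
-- alternative decomposition, same cost).

-- ord(c)
def pvOrd (c : Char) : Int := (c.toNat : Int)

-- format(n, '06b'): binary digits of |n|, sign in front, zero-padded to total width 6.
-- Exact for width 6 on every Int (both Pythons call it only with 0 ≤ n < 64 on Dom).
def pvFmt06b (n : Int) : List Char :=
  let s := PySem.Int.toBinChars n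
  if n < 0 then '-' :: (List.replicate (6 - s.length) '0' ++ s.tail)
  else List.replicate (6 - s.length) '0' ++ s

-- ===== PORT A =====
def encode_map_string (s : List Char) : List Char :=
  (PySem.List.pyRange 0 (s.length : Int) 1).foldl
    (fun binary i => binary ++ pvFmt06b (pvOrd (PySem.List.pyGetD s i ' ') - pvOrd 'a' + 1)) []

def encode_map_numbers (s : List Char) : List Char :=
  (PySem.List.pyRange 0 (s.length : Int) 1).foldl
    (fun binary i => binary ++ pvFmt06b (pvOrd (PySem.List.pyGetD s i ' ') - pvOrd '0' + 27)) []

def encode_map_period (c : Char) : List Char := [] ++ pvFmt06b (pvOrd c - pvOrd '.' + 37)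
def encode_map_space (c : Char) : List Char := [] ++ pvFmt06b (pvOrd c - pvOrd ' ' + 38)
def encode_map_hiphen (c : Char) : List Char := [] ++ pvFmt06b (pvOrd c - pvOrd '-' + 39)
def encode_map_single_quote (c : Char) : List Char := [] ++ pvFmt06b (pvOrd c - pvOrd '\'' + 40)
def encode_map_double_quote (c : Char) : List Char := [] ++ pvFmt06b (pvOrd c - pvOrd '"' + 41)
def encode_map_tilde (c : Char) : List Char := [] ++ pvFmt06b (pvOrd c - pvOrd '~' + 50)

-- input_lower[i] is re-read at each test, exactly as the Python subscripts it;
-- inside Dom every pyGetD index is in range, so the ' ' default is never read.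
def encode_input (input : String) : String :=
  String.ofList ((PySem.List.pyRange 0 (input.toList.length : Int) 1).foldl
    (fun binary i =>
      if PySem.Chars.isalpha (PySem.List.pyGetD (PySem.Chars.lower input.toList) i ' ') then
        binary ++ encode_map_string [PySem.List.pyGetD (PySem.Chars.lower input.toList) i ' ']
      else if PySem.Chars.isdigit (PySem.List.pyGetD (PySem.Chars.lower input.toList) i ' ') then
        binary ++ encode_map_numbers [PySem.List.pyGetD (PySem.Chars.lower input.toList) i ' ']
      else if PySem.Chars.isspace (PySem.List.pyGetD (PySem.Chars.lower input.toList) i ' ') then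
        binary ++ encode_map_space (PySem.List.pyGetD (PySem.Chars.lower input.toList) i ' ')
      else if PySem.List.pyGetD (PySem.Chars.lower input.toList) i ' ' = '.' then
        binary ++ encode_map_period (PySem.List.pyGetD (PySem.Chars.lower input.toList) i ' ')
      else if PySem.List.pyGetD (PySem.Chars.lower input.toList) i ' ' = '-' then
        binary ++ encode_map_hiphen (PySem.List.pyGetD (PySem.Chars.lower input.toList) i ' ')
      else if PySem.List.pyGetD (PySem.Chars.lower input.toList) i ' ' = '\'' then
        binary ++ encode_map_single_quote (PySem.List.pyGetD (PySem.Chars.lower input.toList) i ' ')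
      else if PySem.List.pyGetD (PySem.Chars.lower input.toList) i ' ' = '"' then
        binary ++ encode_map_double_quote (PySem.List.pyGetD (PySem.Chars.lower input.toList) i ' ')
      else if PySem.List.pyGetD (PySem.Chars.lower input.toList) i ' ' = '~' then
        binary ++ encode_map_tilde (PySem.List.pyGetD (PySem.Chars.lower input.toList) i ' ')
      else binary) [])

-- ===== PORT B =====
-- _build_table(): the four staged loops of Source B, each folding inserts into the dict.
def pvTable : PySem.Dict Char (List Char) :=
  let t := "abcdefghijklmnopqrstuvwxyz".toList.foldl
    (fun t c => t.insert c (pvFmt06b (pvOrd c - pvOrd 'a' + 1))) PySem.Dict.empty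
  let t := "0123456789".toList.foldl
    (fun t c => t.insert c (pvFmt06b (pvOrd c - pvOrd '0' + 27))) t
  let t := " \t\n\x0b\x0c\r".toList.foldl
    (fun t c => t.insert c (pvFmt06b (pvOrd c - pvOrd ' ' + 38))) t
  [('.', (37 : Int)), ('-', 39), ('\'', 40), ('"', 41), ('~', 50)].foldl
    (fun t p => t.insert p.1 (pvFmt06b p.2)) t

-- ''.join(_TABLE.get(c, '') for c in input.lower())
def encode_input_alt (input : String) : String :=
  String.ofList (((PySem.Chars.lower input.toList).map
    (fun c => PySem.Dict.getD pvTable c [])).flatten)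

-- ===== PRECONDITION & SPEC =====
def Spec_encode_input (input : String) (out : String) : Prop := out = encode_input_alt input
instance (input : String) (out : String) : Decidable (Spec_encode_input input out) := by unfold Spec_encode_input; infer_instance

-- ===== CLAIM (what is proved, stated in full; the proofs are below) =====
def Claim_equal_encode_input : Prop := ∀ (input : String), Dom_encode_input input → Spec_encode_input input (encode_input input)

-- ===== LEMMAS AND PROOFS =====

-- A's per-character step, factored out of the loop body for the proof.
def pvStepA (c : Char) : List Char :=
  if PySem.Chars.isalpha c then encode_map_string [c]
  else if PySem.Chars.isdigit c then encode_map_numbers [c]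
  else if PySem.Chars.isspace c then encode_map_space c
  else if c = '.' then encode_map_period c
  else if c = '-' then encode_map_hiphen c
  else if c = '\'' then encode_map_single_quote c
  else if c = '"' then encode_map_double_quote c
  else if c = '~' then encode_map_tilde c
  else []

-- A's loop body always appends pvStepA of the current character (the silent branch appends []).
theorem pv_bodyA_eq :
    (fun (binary : List Char) (c : Char) =>
      if PySem.Chars.isalpha c then binary ++ encode_map_string [c]
      else if PySem.Chars.isdigit c then binary ++ encode_map_numbers [c]
      else if PySem.Chars.isspace c then binary ++ encode_map_space c
      else if c = '.' then binary ++ encode_map_period c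
      else if c = '-' then binary ++ encode_map_hiphen c
      else if c = '\'' then binary ++ encode_map_single_quote c
      else if c = '"' then binary ++ encode_map_double_quote c
      else if c = '~' then binary ++ encode_map_tilde c
      else binary) = (fun binary c => binary ++ pvStepA c) := by
  funext binary c
  unfold pvStepA
  split_ifs <;> simp

-- On every lowered character drawn from the domain (code ≤ 126), A's cascade and
-- B's table lookup agree; checked exhaustively over the 127 codes.
set_option maxRecDepth 100000 in
theorem pv_char_eq : ∀ n : Fin 127, pvDomChar (Char.ofNat n.val) = true →
    pvStepA (PySem.Chars.lowerChar (Char.ofNat n.val)) =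
      PySem.Dict.getD pvTable (PySem.Chars.lowerChar (Char.ofNat n.val)) [] := by decide

-- ===== VERDICT (by name: the statement is the Claim_ definition above) =====
set_option maxRecDepth 8192 in
theorem encode_input_spec : Claim_equal_encode_input := by
  intro input hdom
  show encode_input input = encode_input_alt input
  unfold encode_input encode_input_alt
  have hlen : input.toList.length = (PySem.Chars.lower input.toList).length := by
    simp [PySem.Chars.lower]
  rw [hlen,
    PySem.List.foldl_pyRange_zero_pyGetD' (PySem.Chars.lower input.toList) ' '
      (fun binary c =>
        if PySem.Chars.isalpha c then binary ++ encode_map_string [c]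
        else if PySem.Chars.isdigit c then binary ++ encode_map_numbers [c]
        else if PySem.Chars.isspace c then binary ++ encode_map_space c
        else if c = '.' then binary ++ encode_map_period c
        else if c = '-' then binary ++ encode_map_hiphen c
        else if c = '\'' then binary ++ encode_map_single_quote c
        else if c = '"' then binary ++ encode_map_double_quote c
        else if c = '~' then binary ++ encode_map_tilde c
        else binary) [],
    pv_bodyA_eq, PySem.List.foldl_append_eq_flatMap]
  simp only [List.flatMap_def, List.nil_append]
  refine congrArg String.ofList (congrArg List.flatten (List.map_congr_left ?_))
  intro c hc
  simp only [PySem.Chars.lower, List.mem_map] at hc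
  obtain ⟨c0, hc0, rfl⟩ := hc
  have hd : pvDomChar c0 = true := by
    have := hdom
    unfold Dom_encode_input pvDomStr at this
    exact (List.all_eq_true.mp this) c0 hc0
  have hle : c0.toNat ≤ 126 := by
    simp [pvDomChar] at hd; omega
  have h2 : pvDomChar (Char.ofNat c0.toNat) = true := by rwa [Char.ofNat_toNat]
  have := pv_char_eq ⟨c0.toNat, by omega⟩ h2
  rwa [Char.ofNat_toNat] at this
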